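-- pv_equiv track=rewrite | github.com/AlePaff/Proyecto-Tinder-python | Estructura.py | validarPseudonimo
-- ===== SOURCE A (Python) =====
-- def validarPseudonimo(pseudonimo):
--
--     if any(i.isupper () for i in pseudonimo):
--         return False
--
--     elif (any (i in "!#$%&/()=?¡¿[]+-{}" for i in pseudonimo)):
--         return False
--
--     elif (any (i.isdigit () for i in pseudonimo)) or (any (i == "_" for i in pseudonimo)) or any (letra.islower () for letra in pseudonimo):
--         #si entró a este elif, es porque no hay mayusculas, ni simbolos especiales
--         return True  # ("hay almenos un numero o un guion bajo o una minuscula")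
--
--     else:
--         return False
-- ===== SOURCE B (Python) =====
-- def validarPseudonimo(pseudonimo):
--     has_upper = False
--     has_special = False
--     has_valid = False
--     for ch in pseudonimo:
--         if ch.isupper():
--             has_upper = True
--         if ch in "!#$%&/()=?¡¿[]+-{}":
--             has_special = True
--         if ch.isdigit() or ch == "_" or ch.islower():
--             has_valid = True
--     if has_upper:
--         return False
--     if has_special:
--         return False
--     return has_valid
-- ===== Notes on version B (the rewrite author's own statement) =====
-- stated objective: alternative
-- what changed: Replaced A's three separate any(...) generator-expression scans by a single pass over the characters that accumulates three boolean flags, applying the same precedence afterwards.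
import Mathlib
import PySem

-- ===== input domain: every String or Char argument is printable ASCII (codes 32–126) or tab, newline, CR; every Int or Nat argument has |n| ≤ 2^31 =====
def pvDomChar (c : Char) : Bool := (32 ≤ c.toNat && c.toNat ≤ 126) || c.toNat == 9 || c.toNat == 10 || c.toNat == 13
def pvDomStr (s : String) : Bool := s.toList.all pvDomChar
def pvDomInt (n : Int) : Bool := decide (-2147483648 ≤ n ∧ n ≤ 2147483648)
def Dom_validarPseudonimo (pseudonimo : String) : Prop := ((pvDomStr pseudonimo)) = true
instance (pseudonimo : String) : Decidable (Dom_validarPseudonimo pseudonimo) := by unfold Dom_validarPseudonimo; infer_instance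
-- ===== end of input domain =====

-- B replaces A's three separate any(...) scans by one pass that accumulates three flags; same cost, different decomposition.

-- ===== PORT A =====
def pvSimbolos : List Char := "!#$%&/()=?¡¿[]+-{}".toList

def validarPseudonimo (pseudonimo : String) : Bool :=
  if pseudonimo.toList.any (fun i => PySem.Chars.isupper i) then false
  else if pseudonimo.toList.any (fun i => pvSimbolos.contains i) then false
  else if (pseudonimo.toList.any (fun i => PySem.Chars.isdigit i)
        || pseudonimo.toList.any (fun i => i == '_')
        || pseudonimo.toList.any (fun letra => PySem.Chars.islower letra)) then true
  else false

-- ===== PORT B =====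
def pvStepB (st : Bool × Bool × Bool) (ch : Char) : Bool × Bool × Bool :=
  let st1 := if PySem.Chars.isupper ch then (true, st.2.1, st.2.2) else st
  let st2 := if pvSimbolos.contains ch then (st1.1, true, st1.2.2) else st1
  if PySem.Chars.isdigit ch || ch == '_' || PySem.Chars.islower ch then (st2.1, st2.2.1, true) else st2

def validarPseudonimo_alt (pseudonimo : String) : Bool :=
  let st := pseudonimo.toList.foldl pvStepB (false, false, false)
  if st.1 then false
  else if st.2.1 then false
  else st.2.2

-- ===== PRECONDITION & SPEC =====
def Spec_validarPseudonimo (pseudonimo : String) (out : Bool) : Prop := out = validarPseudonimo_alt pseudonimo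
instance (pseudonimo : String) (out : Bool) : Decidable (Spec_validarPseudonimo pseudonimo out) := by unfold Spec_validarPseudonimo; infer_instance

-- ===== CLAIM (what is proved, stated in full; the proofs are below) =====
def Claim_equal_validarPseudonimo : Prop := ∀ (pseudonimo : String), Dom_validarPseudonimo pseudonimo → Spec_validarPseudonimo pseudonimo (validarPseudonimo pseudonimo)

-- ===== LEMMAS AND PROOFS =====
lemma pvStepB_eq (a b c : Bool) (x : Char) :
    pvStepB (a, b, c) x
      = (a || PySem.Chars.isupper x,
         b || pvSimbolos.contains x,
         c || (PySem.Chars.isdigit x || x == '_' || PySem.Chars.islower x)) := by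
  unfold pvStepB
  split_ifs <;> simp_all

lemma pvFoldB (l : List Char) (a b c : Bool) :
    l.foldl pvStepB (a, b, c)
      = (a || l.any (fun i => PySem.Chars.isupper i),
         b || l.any (fun i => pvSimbolos.contains i),
         c || l.any (fun i => PySem.Chars.isdigit i || i == '_' || PySem.Chars.islower i)) := by
  induction l generalizing a b c with
  | nil => simp
  | cons x xs ih =>
      rw [List.foldl_cons, pvStepB_eq, ih]
      simp [Bool.or_assoc]

-- ===== VERDICT (by name: the statement is the Claim_ definition above) =====
theorem validarPseudonimo_spec : Claim_equal_validarPseudonimo := by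
  intro s _
  unfold Spec_validarPseudonimo validarPseudonimo validarPseudonimo_alt
  simp only [pvFoldB, Bool.false_or]
  split_ifs with h1 h2 h3 <;> simp_all
  · obtain (⟨x, hx, hd⟩ | hu) | ⟨x, hx, hl⟩ := h3
    · exact ⟨x, hx, Or.inl (Or.inl hd)⟩
    · exact ⟨'_', hu, Or.inl (Or.inr rfl)⟩
    · exact ⟨x, hx, Or.inr hl⟩
  · intro x hx hxe
    exact h3.1.2 (hxe ▸ hx)
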